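-- pv_equiv track=rewrite | github.com/haru3535/isbn-book-reader | src/isbn_detector.py | _validate_isbn10
-- ===== SOURCE A (Python) =====
-- def _validate_isbn10(isbn: str) -> bool:
--     if len(isbn) != 10:
--         return False
--
--     checksum = 0
--     for i, char in enumerate(isbn[:-1]):
--         if not char.isdigit():
--             return False
--         checksum += int(char) * (10 - i)
--
--     last_char = isbn[-1]
--     if last_char == 'X':
--         checksum += 10
--     elif last_char.isdigit():
--         checksum += int(last_char)
--     else:
--         return False
--
--     return checksum % 11 == 0
-- ===== SOURCE B (Python) =====
-- def _validate_isbn10(isbn: str) -> bool: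
--     if len(isbn) != 10:
--         return False
--     s = 0
--     t = 0
--     for i, char in enumerate(isbn):
--         if i == 9 and char == 'X':
--             v = 10
--         elif char.isdigit():
--             v = int(char)
--         else:
--             return False
--         s += v
--         t += s
--     return t % 11 == 0
-- ===== Notes on version B (the rewrite author's own statement) =====
-- stated objective: alternative
-- what changed: Replaces the weighted sum with explicit multipliers (10-i) over isbn[:-1] plus a separate trailing-character case by one uniform pass over all ten characters maintaining two running accumulators (s += v; t += s), using the identity that the sum of prefix sums equals the weighted checksum, so no multiplication and no tail special-casing outside the loop.
import Mathlib
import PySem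

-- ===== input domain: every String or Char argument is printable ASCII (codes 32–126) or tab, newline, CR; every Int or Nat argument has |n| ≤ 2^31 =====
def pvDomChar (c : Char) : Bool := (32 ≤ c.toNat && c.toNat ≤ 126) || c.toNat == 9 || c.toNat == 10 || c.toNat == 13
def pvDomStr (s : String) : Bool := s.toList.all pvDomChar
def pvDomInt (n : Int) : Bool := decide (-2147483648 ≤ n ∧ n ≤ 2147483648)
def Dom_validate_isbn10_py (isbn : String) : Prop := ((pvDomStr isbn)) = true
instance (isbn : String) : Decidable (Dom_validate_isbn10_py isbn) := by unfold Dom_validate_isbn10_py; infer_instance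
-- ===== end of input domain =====

-- B replaces A's weighted sum (weights 10-i over isbn[:-1] plus a tail special case)
-- by one uniform pass over all ten characters with two running accumulators; alternative decomposition.

-- ===== PORT A =====
-- the for-loop over enumerate(isbn[:-1]): none = early 'return False'
-- int(char) for a checked ASCII digit char is exactly (char.toNat - 48)
def pvLoopA : List Char → Int → Int → Option Int
  | [], _, acc => some acc
  | c :: rest, i, acc =>
      if PySem.Chars.isdigit c then
        pvLoopA rest (i + 1) (acc + ((c.toNat : Int) - 48) * (10 - i))
      else none

def validate_isbn10_py (isbn : String) : Bool :=
  let cs := isbn.toList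
  if PySem.Chars.len cs ≠ 10 then false
  else
    match pvLoopA (PySem.List.slice cs none (some (-1))) 0 0 with
    | none => false
    | some checksum =>
      match PySem.List.pyGet? cs (-1) with
      | none => false  -- unreachable: len = 10
      | some last_char =>
        if last_char = 'X' then PySem.Int.mod (checksum + 10) 11 == 0
        else if PySem.Chars.isdigit last_char then
          PySem.Int.mod (checksum + ((last_char.toNat : Int) - 48)) 11 == 0
        else false

-- ===== PORT B =====
-- the for-loop over enumerate(isbn): state (s, t); none = early 'return False'
def pvLoopB : List Char → Int → Int → Int → Option Int
  | [], _, _, t => some t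
  | c :: rest, i, s, t =>
      let v? : Option Int :=
        if i = 9 ∧ c = 'X' then some 10
        else if PySem.Chars.isdigit c then some ((c.toNat : Int) - 48)
        else none
      match v? with
      | none => none
      | some v => pvLoopB rest (i + 1) (s + v) (t + (s + v))

def validate_isbn10_py_alt (isbn : String) : Bool :=
  let cs := isbn.toList
  if PySem.Chars.len cs ≠ 10 then false
  else
    match pvLoopB cs 0 0 0 with
    | none => false
    | some t => PySem.Int.mod t 11 == 0

-- ===== PRECONDITION & SPEC =====
def Spec_validate_isbn10_py (isbn : String) (out : Bool) : Prop := out = validate_isbn10_py_alt isbn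
instance (isbn : String) (out : Bool) : Decidable (Spec_validate_isbn10_py isbn out) := by unfold Spec_validate_isbn10_py; infer_instance

-- ===== CLAIM (what is proved, stated in full; the proofs are below) =====
def Claim_equal_validate_isbn10_py : Prop := ∀ (isbn : String), Dom_validate_isbn10_py isbn → Spec_validate_isbn10_py isbn (validate_isbn10_py isbn)

-- ===== LEMMAS AND PROOFS =====

theorem main_eq (isbn : String) : validate_isbn10_py isbn = validate_isbn10_py_alt isbn := by
  unfold validate_isbn10_py validate_isbn10_py_alt
  simp only []
  generalize isbn.toList = cs
  by_cases h : PySem.Chars.len cs ≠ 10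
  · rw [if_pos h, if_pos h]
  · rw [if_neg h, if_neg h]
    have hlen : cs.length = 10 := by
      have h10 : PySem.Chars.len cs = 10 := by omega
      rw [PySem.Chars.len_eq] at h10
      exact_mod_cast h10
    obtain ⟨c0, cs, rfl⟩ : ∃ a l, cs = a :: l := by cases cs <;> simp_all
    obtain ⟨c1, cs, rfl⟩ : ∃ a l, cs = a :: l := by cases cs <;> simp_all
    obtain ⟨c2, cs, rfl⟩ : ∃ a l, cs = a :: l := by cases cs <;> simp_all
    obtain ⟨c3, cs, rfl⟩ : ∃ a l, cs = a :: l := by cases cs <;> simp_all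
    obtain ⟨c4, cs, rfl⟩ : ∃ a l, cs = a :: l := by cases cs <;> simp_all
    obtain ⟨c5, cs, rfl⟩ : ∃ a l, cs = a :: l := by cases cs <;> simp_all
    obtain ⟨c6, cs, rfl⟩ : ∃ a l, cs = a :: l := by cases cs <;> simp_all
    obtain ⟨c7, cs, rfl⟩ : ∃ a l, cs = a :: l := by cases cs <;> simp_all
    obtain ⟨c8, cs, rfl⟩ : ∃ a l, cs = a :: l := by cases cs <;> simp_all
    obtain ⟨c9, cs, rfl⟩ : ∃ a l, cs = a :: l := by cases cs <;> simp_all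
    have hnil : cs = [] := by simp_all
    subst hnil
    have hs : PySem.List.slice [c0,c1,c2,c3,c4,c5,c6,c7,c8,c9] none (some (-1))
        = [c0,c1,c2,c3,c4,c5,c6,c7,c8] := rfl
    have hget : PySem.List.pyGet? [c0,c1,c2,c3,c4,c5,c6,c7,c8,c9] (-1) = some c9 := rfl
    by_cases d0 : PySem.Chars.isdigit c0 = true
    case neg => simp [pvLoopA, pvLoopB, hs, d0]
    by_cases d1 : PySem.Chars.isdigit c1 = true
    case neg => simp [pvLoopA, pvLoopB, hs, d0, d1]
    by_cases d2 : PySem.Chars.isdigit c2 = true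
    case neg => simp [pvLoopA, pvLoopB, hs, d0, d1, d2]
    by_cases d3 : PySem.Chars.isdigit c3 = true
    case neg => simp [pvLoopA, pvLoopB, hs, d0, d1, d2, d3]
    by_cases d4 : PySem.Chars.isdigit c4 = true
    case neg => simp [pvLoopA, pvLoopB, hs, d0, d1, d2, d3, d4]
    by_cases d5 : PySem.Chars.isdigit c5 = true
    case neg => simp [pvLoopA, pvLoopB, hs, d0, d1, d2, d3, d4, d5]
    by_cases d6 : PySem.Chars.isdigit c6 = true
    case neg => simp [pvLoopA, pvLoopB, hs, d0, d1, d2, d3, d4, d5, d6]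
    by_cases d7 : PySem.Chars.isdigit c7 = true
    case neg => simp [pvLoopA, pvLoopB, hs, d0, d1, d2, d3, d4, d5, d6, d7]
    by_cases d8 : PySem.Chars.isdigit c8 = true
    case neg => simp [pvLoopA, pvLoopB, hs, d0, d1, d2, d3, d4, d5, d6, d7, d8]
    rw [hs, hget]
    by_cases hX : c9 = 'X'
    · simp [pvLoopA, pvLoopB, d0, d1, d2, d3, d4, d5, d6, d7, d8, hX]
      ring_nf
    · by_cases d9 : PySem.Chars.isdigit c9 = true
      · simp [pvLoopA, pvLoopB, d0, d1, d2, d3, d4, d5, d6, d7, d8, d9, hX]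
        ring_nf
      · simp [pvLoopA, pvLoopB, d0, d1, d2, d3, d4, d5, d6, d7, d8, d9, hX]

-- ===== VERDICT (by name: the statement is the Claim_ definition above) =====
theorem validate_isbn10_py_spec : Claim_equal_validate_isbn10_py := by
  intro isbn _
  unfold Spec_validate_isbn10_py
  exact main_eq isbn
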